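-- pv_equiv track=rewrite | github.com/rebeccarivers10/thomasnet-scraper | scraper.py | _clean_emails
-- ===== SOURCE A (Python) =====
-- _IGNORED_EMAIL_DOMAINS = {
--     "example.com", "domain.com", "yourcompany.com", "company.com",
--     "email.com", "test.com", "sentry.io", "sentry-cdn.com",
--     "w3.org", "schema.org", "google.com", "googleapis.com",
--     "jquery.com", "bootstrapcdn.com", "cloudflare.com",
-- }
--
-- def _clean_emails(raw: list[str], site_domain: str = "") -> list[str]:
--     """
--     Return cleaned, deduplicated emails.
--     When site_domain is provided, emails matching that domain are returned first
--     and emails from other domains are only included if no on-domain email was found.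
--     This prevents partner/distributor emails scraped from the page from being
--     attributed to the wrong company.
--     """
--     seen: set[str] = set()
--     on_domain: list[str] = []
--     off_domain: list[str] = []
--
--     for e in raw:
--         e = e.lower().strip(".")
--         domain = e.split("@")[-1]
--         if domain in _IGNORED_EMAIL_DOMAINS:
--             continue
--         if any(e.endswith(ext) for ext in (".png", ".jpg", ".gif", ".js", ".css", ".svg")):
--             continue
--         if e in seen:
--             continue
--         seen.add(e)
--         if site_domain and site_domain in domain:
--             on_domain.append(e)
--         else:
--             off_domain.append(e)
--
--     # Prefer domain-matched emails; fall back to others only if none found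
--     result = on_domain if on_domain else off_domain
--     return result[:5]
-- ===== SOURCE B (Python) =====
-- _IGNORED_EMAIL_DOMAINS = {
--     "example.com", "domain.com", "yourcompany.com", "company.com",
--     "email.com", "test.com", "sentry.io", "sentry-cdn.com",
--     "w3.org", "schema.org", "google.com", "googleapis.com",
--     "jquery.com", "bootstrapcdn.com", "cloudflare.com",
-- }
--
-- _IMG_EXTS = (".png", ".jpg", ".gif", ".js", ".css", ".svg")
--
--
-- def _clean_emails(raw: list[str], site_domain: str = "") -> list[str]:
--     """Two-pass collector with early exit: first scan gathers up to five
--     on-domain emails and stops as soon as it has five; only if that pass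
--     finds none is the list rescanned for off-domain emails (again stopping
--     at five).  No partition lists or shared seen-set are ever built."""
--     def _collect(want_on: bool) -> list[str]:
--         out: list[str] = []
--         for e in raw:
--             e = e.lower().strip(".")
--             d = e.split("@")[-1]
--             if d in _IGNORED_EMAIL_DOMAINS or e.endswith(_IMG_EXTS) or e in out:
--                 continue
--             if bool(site_domain and site_domain in d) == want_on:
--                 out.append(e)
--                 if len(out) == 5:
--                     break
--         return out
--
--     return _collect(True) or _collect(False)
-- ===== Notes on version B (the rewrite author's own statement) =====
-- stated objective: faster
-- what changed: Replaced the single fused loop (shared seen-set feeding two partition lists, then a preference pick and a final [:5] slice) with a two-pass early-exit collector: one scan gathers at most five on-domain emails and breaks as soon as it has five; only if that scan yields nothing is the list rescanned for off-domain emails, so no partition lists, shared seen-set or final slice exist.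
import Mathlib
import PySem

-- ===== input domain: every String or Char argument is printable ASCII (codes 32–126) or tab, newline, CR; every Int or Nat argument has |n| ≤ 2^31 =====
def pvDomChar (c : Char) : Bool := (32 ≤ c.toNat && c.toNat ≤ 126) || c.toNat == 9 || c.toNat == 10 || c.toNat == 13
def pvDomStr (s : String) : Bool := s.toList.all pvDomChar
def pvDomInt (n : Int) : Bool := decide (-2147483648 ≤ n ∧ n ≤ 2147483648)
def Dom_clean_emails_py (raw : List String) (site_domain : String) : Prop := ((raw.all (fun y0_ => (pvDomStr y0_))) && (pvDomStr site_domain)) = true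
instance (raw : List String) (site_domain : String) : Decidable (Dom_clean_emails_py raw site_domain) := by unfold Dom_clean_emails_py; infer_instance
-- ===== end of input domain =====

-- B replaces A's fused partition loop by a two-pass collector that stops after five hits (measured faster); return values proved equal on Dom.


-- shared vocabulary both Python sources literally contain: the ignored-domain set,
-- the image-suffix tuple, e.lower().strip("."), e.split("@")[-1], and the on-domain test
def pvIgnored : List String :=
  ["example.com", "domain.com", "yourcompany.com", "company.com",
   "email.com", "test.com", "sentry.io", "sentry-cdn.com",
   "w3.org", "schema.org", "google.com", "googleapis.com",
   "jquery.com", "bootstrapcdn.com", "cloudflare.com"]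

def pvImgExts : List String := [".png", ".jpg", ".gif", ".js", ".css", ".svg"]

def pvNorm (e : String) : String := PySem.Str.stripChars (PySem.Str.lower e) "."

-- e.split("@")[-1]: split with the nonempty separator "@" always yields some nonempty list,
-- so [-1] is exactly getLastD (the defaults are never reached)
def emailDomainOf (e : String) : String := ((PySem.Str.split? e "@").getD []).getLastD ""

-- 'site_domain and site_domain in domain' (string truthiness = nonempty)
def pvOn (site_domain : String) (e : String) : Bool :=
  !(site_domain == "") && PySem.Str.isIn site_domain (emailDomainOf e)

-- ===== PORT A =====
def pvStepA (site_domain : String) (acc : PySem.Set String × List String × List String)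
    (e0 : String) : PySem.Set String × List String × List String :=
  if pvIgnored.contains (emailDomainOf (pvNorm e0)) then acc
  else if pvImgExts.any (fun ext => PySem.Str.endswith (pvNorm e0) ext) then acc
  else if PySem.Set.contains acc.1 (pvNorm e0) then acc
  else if !(site_domain == "") && PySem.Str.isIn site_domain (emailDomainOf (pvNorm e0)) then
    (PySem.Set.add acc.1 (pvNorm e0), acc.2.1 ++ [pvNorm e0], acc.2.2)
  else
    (PySem.Set.add acc.1 (pvNorm e0), acc.2.1, acc.2.2 ++ [pvNorm e0])

def clean_emails_py (raw : List String) (site_domain : String) : List String :=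
  let st := raw.foldl (pvStepA site_domain) (PySem.Set.empty, [], [])
  let result := if st.2.1 ≠ [] then st.2.1 else st.2.2
  PySem.List.slice result none (some 5)

-- ===== PORT B =====
-- the inner 'for e in raw: … append … if len(out)==5: break' loop of Source B's _collect
def pvCollect (site_domain : String) (want_on : Bool) : List String → List String → List String
  | out, [] => out
  | out, e :: t =>
    let n := pvNorm e
    if pvIgnored.contains (emailDomainOf n) || pvImgExts.any (fun ext => PySem.Str.endswith n ext)
        || out.contains n then
      pvCollect site_domain want_on out t
    else if pvOn site_domain n == want_on then
      if (out ++ [n]).length = 5 then out ++ [n]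
      else pvCollect site_domain want_on (out ++ [n]) t
    else pvCollect site_domain want_on out t

def clean_emails_py_alt (raw : List String) (site_domain : String) : List String :=
  let onl := pvCollect site_domain true [] raw
  if onl ≠ [] then onl else pvCollect site_domain false [] raw

-- ===== PRECONDITION & SPEC =====
def Spec_clean_emails_py (raw : List String) (site_domain : String) (out : List String) : Prop := out = clean_emails_py_alt raw site_domain
instance (raw : List String) (site_domain : String) (out : List String) : Decidable (Spec_clean_emails_py raw site_domain out) := by unfold Spec_clean_emails_py; infer_instance

-- ===== CLAIM (what is proved, stated in full; the proofs are below) =====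
def Claim_equal_clean_emails_py : Prop := ∀ (raw : List String) (site_domain : String), Dom_clean_emails_py raw site_domain → Spec_clean_emails_py raw site_domain (clean_emails_py raw site_domain)

-- ===== LEMMAS AND PROOFS =====

def pvKeep (e : String) : Bool :=
  !(pvIgnored.contains (emailDomainOf e)) && !(pvImgExts.any (fun ext => PySem.Str.endswith e ext))

-- the not-yet-seen elements of ks relative to seen-set s, in first-seen order
def pvFresh (s : PySem.Set String) : List String → List String
  | [] => []
  | x :: t => if PySem.Set.contains s x then pvFresh s t else x :: pvFresh (PySem.Set.add s x) t

lemma pvLoop_inv (site_domain : String) (raw : List String) :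
    ∀ (s : PySem.Set String) (onD offD : List String),
    raw.foldl (pvStepA site_domain) (s, onD, offD) =
      (PySem.Set.update s ((raw.map pvNorm).filter pvKeep),
       onD ++ (pvFresh s ((raw.map pvNorm).filter pvKeep)).filter (pvOn site_domain),
       offD ++ (pvFresh s ((raw.map pvNorm).filter pvKeep)).filter (fun e => !(pvOn site_domain e))) := by
  induction raw with
  | nil => intro s onD offD; simp [pvFresh, PySem.Set.update]
  | cons e0 t ih =>
    intro s onD offD
    rw [List.foldl_cons]
    by_cases hi : pvIgnored.contains (emailDomainOf (pvNorm e0)) = true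
    · have hk : pvKeep (pvNorm e0) = false := by unfold pvKeep; rw [hi]; rfl
      have hst : pvStepA site_domain (s, onD, offD) e0 = (s, onD, offD) := by
        simp only [pvStepA]; rw [if_pos hi]
      rw [hst, ih s onD offD]
      simp [hk]
    · have hi' : pvIgnored.contains (emailDomainOf (pvNorm e0)) = false := by simpa using hi
      by_cases he : (pvImgExts.any fun ext => PySem.Str.endswith (pvNorm e0) ext) = true
      · have hk : pvKeep (pvNorm e0) = false := by unfold pvKeep; rw [hi', he]; rfl
        have hst : pvStepA site_domain (s, onD, offD) e0 = (s, onD, offD) := by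
          simp only [pvStepA]; rw [if_neg hi, if_pos he]
        rw [hst, ih s onD offD]
        simp [hk]
      · have he' : (pvImgExts.any fun ext => PySem.Str.endswith (pvNorm e0) ext) = false := by
          simpa using he
        have hk : pvKeep (pvNorm e0) = true := by unfold pvKeep; rw [hi', he']; rfl
        by_cases hs : PySem.Set.contains s (pvNorm e0) = true
        · have hm : pvNorm e0 ∈ s := (PySem.Set.contains_iff s _).mp hs
          have hadd : PySem.Set.add s (pvNorm e0) = s := by simp [PySem.Set.add, hm]
          have hst : pvStepA site_domain (s, onD, offD) e0 = (s, onD, offD) := by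
            simp only [pvStepA]; rw [if_neg hi, if_neg he, if_pos hs]
          rw [hst, ih s onD offD]
          have hfr : pvFresh s (pvNorm e0 :: (t.map pvNorm).filter pvKeep)
              = pvFresh s ((t.map pvNorm).filter pvKeep) := by
            simp only [pvFresh]; rw [if_pos hs]
          simp [hk, hfr, hm, PySem.Set.update, List.foldl_cons]
        · have hfr : pvFresh s (pvNorm e0 :: (t.map pvNorm).filter pvKeep)
              = pvNorm e0 :: pvFresh (PySem.Set.add s (pvNorm e0)) ((t.map pvNorm).filter pvKeep) := by
            simp only [pvFresh]; rw [if_neg hs]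
          have hupd : PySem.Set.update s (pvNorm e0 :: (t.map pvNorm).filter pvKeep)
              = PySem.Set.update (PySem.Set.add s (pvNorm e0)) ((t.map pvNorm).filter pvKeep) := by
            simp [PySem.Set.update, List.foldl_cons]
          by_cases hp : pvOn site_domain (pvNorm e0) = true
          · have hp' : (!(site_domain == "") && PySem.Str.isIn site_domain (emailDomainOf (pvNorm e0))) = true := hp
            have hst : pvStepA site_domain (s, onD, offD) e0
                = (PySem.Set.add s (pvNorm e0), onD ++ [pvNorm e0], offD) := by
              simp only [pvStepA]; rw [if_neg hi, if_neg he, if_neg hs, if_pos hp']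
            rw [hst, ih (PySem.Set.add s (pvNorm e0)) (onD ++ [pvNorm e0]) offD]
            simp [hk, hfr, hupd, hp]
          · have hp'' : pvOn site_domain (pvNorm e0) = false := by simpa using hp
            have hp' : (!(site_domain == "") && PySem.Str.isIn site_domain (emailDomainOf (pvNorm e0))) = false := hp''
            have hst : pvStepA site_domain (s, onD, offD) e0
                = (PySem.Set.add s (pvNorm e0), onD, offD ++ [pvNorm e0]) := by
              have hne : ¬((!(site_domain == "") && PySem.Str.isIn site_domain (emailDomainOf (pvNorm e0))) = true) := by
                rw [hp']; exact Bool.false_ne_true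
              simp only [pvStepA]; rw [if_neg hi, if_neg he, if_neg hs, if_neg hne]
            rw [hst, ih (PySem.Set.add s (pvNorm e0)) onD (offD ++ [pvNorm e0])]
            simp [hk, hfr, hupd, hp'']

-- filter commutes with first-seen dedup (seen-set filtered alongside)
lemma pvFresh_filter (p : String → Bool) :
    ∀ (l s : List String), (pvFresh s l).filter p = pvFresh (s.filter p) (l.filter p) := by
  intro l
  induction l with
  | nil => intro s; simp [pvFresh]
  | cons x t ih =>
    intro s
    by_cases h : PySem.Set.contains s x = true
    · have hm : x ∈ s := (PySem.Set.contains_iff s x).mp h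
      have hL : pvFresh s (x :: t) = pvFresh s t := by simp only [pvFresh]; rw [if_pos h]
      rw [hL, ih s]
      by_cases hp : p x = true
      · have hm' : x ∈ s.filter p := List.mem_filter.mpr ⟨hm, hp⟩
        have hc : PySem.Set.contains (s.filter p) x = true := (PySem.Set.contains_iff _ x).mpr hm'
        simp only [List.filter_cons, hp, if_true]
        simp only [pvFresh]
        rw [if_pos hc]
      · simp [List.filter_cons, hp]
    · have hm : x ∉ s := fun m => h ((PySem.Set.contains_iff s x).mpr m)
      have hadd : PySem.Set.add s x = s ++ [x] := by simp [PySem.Set.add, hm]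
      have hL : pvFresh s (x :: t) = x :: pvFresh (s ++ [x]) t := by
        simp only [pvFresh]; rw [if_neg h, hadd]
      by_cases hp : p x = true
      · have hm' : x ∉ s.filter p := fun m => hm (List.mem_filter.mp m).1
        have hc : ¬ PySem.Set.contains (s.filter p) x = true :=
          fun c => hm' ((PySem.Set.contains_iff _ x).mp c)
        have hadd' : PySem.Set.add (s.filter p) x = s.filter p ++ [x] := by
          simp [PySem.Set.add, hm']
        have hfl : (s ++ [x]).filter p = s.filter p ++ [x] := by simp [List.filter_append, hp]
        rw [hL]
        simp only [List.filter_cons, hp, if_true]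
        rw [ih (s ++ [x]), hfl]
        simp only [pvFresh]
        rw [if_neg hc, hadd']
      · have hfl : (s ++ [x]).filter p = s.filter p := by
          simp [List.filter_append, hp]
        rw [hL]
        simp only [List.filter_cons, hp, Bool.false_eq_true, if_false]
        rw [ih (s ++ [x]), hfl]

-- the collector computes: out ++ (take (5-|out|) of the fresh pred-matching kept elements)
lemma pvCollect_inv (sd : String) (w : Bool) :
    ∀ (t out : List String), out.length < 5 →
    pvCollect sd w out t =
      out ++ List.take (5 - out.length)
        (pvFresh out ((t.map pvNorm).filter (fun n => pvKeep n && (pvOn sd n == w)))) := by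
  intro t
  induction t with
  | nil => intro out hlen; simp [pvCollect, pvFresh]
  | cons e t ih =>
    intro out hlen
    by_cases hi : pvIgnored.contains (emailDomainOf (pvNorm e)) = true
    · have hk : pvKeep (pvNorm e) = false := by unfold pvKeep; rw [hi]; rfl
      have hL : pvCollect sd w out (e :: t) = pvCollect sd w out t := by
        simp only [pvCollect]; rw [if_pos (by simp only [hi, Bool.true_or])]
      rw [hL, ih out hlen]
      simp [hk]
    · have hi' : pvIgnored.contains (emailDomainOf (pvNorm e)) = false := by simpa using hi
      by_cases he : (pvImgExts.any fun ext => PySem.Str.endswith (pvNorm e) ext) = true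
      · have hk : pvKeep (pvNorm e) = false := by unfold pvKeep; rw [hi', he]; rfl
        have hL : pvCollect sd w out (e :: t) = pvCollect sd w out t := by
          simp only [pvCollect]; rw [if_pos (by simp only [he, Bool.or_true, Bool.true_or])]
        rw [hL, ih out hlen]
        simp [hk]
      · have he' : (pvImgExts.any fun ext => PySem.Str.endswith (pvNorm e) ext) = false := by
          simpa using he
        have hk : pvKeep (pvNorm e) = true := by unfold pvKeep; rw [hi', he']; rfl
        by_cases hc : out.contains (pvNorm e) = true
        · have hm : pvNorm e ∈ out := by simpa using hc
          have hsc : PySem.Set.contains out (pvNorm e) = true :=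
            (PySem.Set.contains_iff out _).mpr hm
          have hL : pvCollect sd w out (e :: t) = pvCollect sd w out t := by
            simp only [pvCollect]; rw [if_pos (by simp only [hc, Bool.or_true])]
          rw [hL, ih out hlen]
          by_cases hw : (pvOn sd (pvNorm e) == w) = true
          · have hfr : pvFresh out (pvNorm e :: (t.map pvNorm).filter (fun n => pvKeep n && (pvOn sd n == w)))
                = pvFresh out ((t.map pvNorm).filter (fun n => pvKeep n && (pvOn sd n == w))) := by
              simp only [pvFresh]; rw [if_pos hsc]
            simp only [List.map_cons, List.filter_cons, hk, hw, Bool.and_self, if_true, hfr,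
              Bool.true_and]
          · simp [hk, hw]
        · have hcf : out.contains (pvNorm e) = false := by simpa using hc
          have hc' : ¬ (pvIgnored.contains (emailDomainOf (pvNorm e))
              || pvImgExts.any (fun ext => PySem.Str.endswith (pvNorm e) ext)
              || out.contains (pvNorm e)) = true := by rw [hi', he', hcf]; decide
          have hm : pvNorm e ∉ out := fun m => hc (by simpa using m)
          have hsc : ¬ PySem.Set.contains out (pvNorm e) = true :=
            fun c => hm ((PySem.Set.contains_iff out _).mp c)
          have hadd : PySem.Set.add out (pvNorm e) = out ++ [pvNorm e] := by
            simp [PySem.Set.add, hm]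
          by_cases hw : (pvOn sd (pvNorm e) == w) = true
          · have hfr : pvFresh out (pvNorm e :: (t.map pvNorm).filter (fun n => pvKeep n && (pvOn sd n == w)))
                = pvNorm e :: pvFresh (out ++ [pvNorm e]) ((t.map pvNorm).filter (fun n => pvKeep n && (pvOn sd n == w))) := by
              simp only [pvFresh]; rw [if_neg hsc, hadd]
            have hfil : (((e :: t).map pvNorm).filter (fun n => pvKeep n && (pvOn sd n == w)))
                = pvNorm e :: (t.map pvNorm).filter (fun n => pvKeep n && (pvOn sd n == w)) := by
              simp [List.filter_cons, hk, hw]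
            have htake : 5 - out.length = (5 - (out.length + 1)) + 1 := by omega
            by_cases h5 : out.length + 1 = 5
            · have hL : pvCollect sd w out (e :: t) = out ++ [pvNorm e] := by
                simp only [pvCollect]; rw [if_neg hc', if_pos hw, if_pos (by simp [h5])]
              rw [hL, hfil, hfr, htake]
              have : 5 - (out.length + 1) = 0 := by omega
              simp [this]
            · have hL : pvCollect sd w out (e :: t) = pvCollect sd w (out ++ [pvNorm e]) t := by
                simp only [pvCollect]; rw [if_neg hc', if_pos hw, if_neg (by simp [h5])]
              rw [hL, ih (out ++ [pvNorm e]) (by simp; omega), hfil, hfr, htake]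
              simp [List.take_succ_cons, List.append_assoc]
          · have hL : pvCollect sd w out (e :: t) = pvCollect sd w out t := by
              simp only [pvCollect]; rw [if_neg hc', if_neg hw]
            rw [hL, ih out hlen]
            simp [hk, hw]

lemma pvCollect_eq (sd : String) (w : Bool) (raw : List String) :
    pvCollect sd w [] raw =
      List.take 5 ((pvFresh [] ((raw.map pvNorm).filter pvKeep)).filter (fun n => pvOn sd n == w)) := by
  rw [pvCollect_inv sd w raw [] (by simp), pvFresh_filter]
  simp [List.filter_filter, Bool.and_comm]

-- ===== VERDICT (by name: the statement is the Claim_ definition above) =====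
theorem clean_emails_py_spec : Claim_equal_clean_emails_py := by
  intro raw sd _
  unfold Spec_clean_emails_py
  simp only [clean_emails_py, clean_emails_py_alt]
  rw [pvLoop_inv sd raw PySem.Set.empty [] [], pvCollect_eq sd true raw, pvCollect_eq sd false raw]
  simp only [List.nil_append, PySem.Set.empty]
  rw [PySem.List.slice_to _ (by norm_num)]
  simp only [beq_true, beq_false]
  by_cases h : (pvFresh [] ((raw.map pvNorm).filter pvKeep)).filter (pvOn sd) = []
  · simp [h]
  · have h5 : List.take 5 ((pvFresh [] ((raw.map pvNorm).filter pvKeep)).filter (pvOn sd)) ≠ [] := by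
      simp [List.take_eq_nil_iff, h]
    simp [h, h5]
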